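-- pv_equiv track=rewrite | github.com/TouqeerChamp/Hackathon-I_AI-Book_RAG-Chatbot | backend/backend_with_llm.py | generate_basic_answer
-- ===== SOURCE A (Python) =====
-- def generate_basic_answer(context: str, question: str) -> str:
--     """
--     Generate an answer based on context and question with a lightweight approach
--     """
--     # Clean up the context
--     clean_context = context.replace('\n', ' ').strip()
--
--     # Extract sentences that seem most relevant to the question
--     sentences = clean_context.split('.')
--     question_lower = question.lower()
--
--     # Find sentences that contain keywords from the question
--     relevant_sentences = []
--     question_words = [word for word in question_lower.split() if len(word) > 3]  # Only longer words
--
--     for sentence in sentences: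
--         sentence_lower = sentence.lower()
--         # Count how many question words appear in this sentence
--         matches = sum(1 for word in question_words if word in sentence_lower)
--         if matches > 0:
--             relevant_sentences.append((sentence.strip(), matches))
--
--     # Sort by relevance (number of matches)
--     relevant_sentences.sort(key=lambda x: x[1], reverse=True)
--
--     # Take top sentences that contribute to answering the question
--     top_sentences = [sent[0] for sent in relevant_sentences[:3]]  # Top 3 most relevant
--
--     # If no specific matches, take the first few sentences as a fallback
--     if not top_sentences:
--         top_sentences = [sent.strip() for sent in sentences[:3] if sent.strip()]
--
--     # Join the selected sentences
--     synthesized_content = '. '.join(top_sentences).strip()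
--
--     if not synthesized_content:
--         return f"Based on the textbook content, I could not find specific information to answer: '{question}'. Please refer to the textbook for more details."
--
--     # Formulate the response
--     answer = f"Based on the Physical AI & Humanoid Robotics textbook:\n\n{synthesized_content}.\n\nThis information addresses your question: '{question}'."
--     return answer
-- ===== SOURCE B (Python) =====
-- def generate_basic_answer(context: str, question: str) -> str:
--     """Online top-3 selection instead of build-all-then-sort."""
--     sentences = context.replace('\n', ' ').strip().split('.')
--     qwords = [w for w in question.lower().split() if len(w) > 3]
--
--     def score(s):
--         sl = s.lower()
--         return sum(1 if w in sl else 0 for w in qwords)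
--
--     # Keep at most 3 (sentence, count) pairs, descending by count, stable:
--     # each new pair is inserted before the first kept pair with a smaller count.
--     top = []
--     for s in sentences:
--         m = score(s)
--         if m > 0:
--             i = 0
--             while i < len(top) and top[i][1] >= m:
--                 i += 1
--             top.insert(i, (s.strip(), m))
--             del top[3:]
--     chosen = [p[0] for p in top]
--
--     if not chosen:
--         chosen = [t for t in (s.strip() for s in sentences[:3]) if t]
--
--     body = '. '.join(chosen).strip()
--     if not body:
--         return f"Based on the textbook content, I could not find specific information to answer: '{question}'. Please refer to the textbook for more details."
--     return f"Based on the Physical AI & Humanoid Robotics textbook:\n\n{body}.\n\nThis information addresses your question: '{question}'."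
-- ===== Notes on version B (the rewrite author's own statement) =====
-- stated objective: alternative
-- what changed: B replaces A's build-all-(sentence,count)-pairs-then-stable-reverse-sort-then-take-3 by a single pass that keeps only the current top-3 pairs via bounded stable insertion (insert before the first kept pair with a smaller count, then drop beyond 3).
import Mathlib
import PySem

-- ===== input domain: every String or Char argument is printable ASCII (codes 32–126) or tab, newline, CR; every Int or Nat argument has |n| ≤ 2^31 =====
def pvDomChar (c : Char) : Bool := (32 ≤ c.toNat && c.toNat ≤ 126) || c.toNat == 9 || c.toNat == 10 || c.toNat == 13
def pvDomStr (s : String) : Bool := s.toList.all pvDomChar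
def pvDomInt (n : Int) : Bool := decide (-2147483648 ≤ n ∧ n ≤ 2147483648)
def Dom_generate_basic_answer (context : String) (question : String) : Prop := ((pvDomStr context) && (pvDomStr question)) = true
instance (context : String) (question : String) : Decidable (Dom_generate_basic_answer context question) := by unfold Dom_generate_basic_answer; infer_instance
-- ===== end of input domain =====

-- B replaces A's build-all-pairs-then-stable-reverse-sort by an online bounded insertion that
-- keeps only the current top-3 (sentence, count) pairs; objective: alternative (same observable result).

-- ===== PORT A =====
def generate_basic_answer (context : String) (question : String) : String :=
  let clean_context := PySem.Str.strip (PySem.Str.replace context "\n" " ")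
  let sentences := (PySem.Str.split? clean_context ".").getD []   -- sep "." ≠ "": split? is some here
  let question_lower := PySem.Str.lower question
  let question_words := (PySem.Str.split₀ question_lower).filter (fun word => 3 < PySem.Str.len word)
  let relevant_sentences := sentences.foldl (fun acc sentence =>
      let sentence_lower := PySem.Str.lower sentence
      let nmatches := question_words.foldl
        (fun n word => if PySem.Str.isIn word sentence_lower then n + 1 else n) (0 : Int)
      if 0 < nmatches then acc ++ [(PySem.Str.strip sentence, nmatches)] else acc) []
  let sorted_rel := PySem.List.sorted relevant_sentences (fun p => p.2) true
  let top_sentences := (PySem.List.slice sorted_rel none (some 3)).map (fun p => p.1)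
  let top_sentences :=
    if top_sentences = [] then
      ((PySem.List.slice sentences none (some 3)).filter
        (fun sent => decide (¬ PySem.Str.strip sent = ""))).map PySem.Str.strip
    else top_sentences
  let synthesized_content := PySem.Str.strip (PySem.Str.join ". " top_sentences)
  if synthesized_content = "" then
    "Based on the textbook content, I could not find specific information to answer: '" ++ question ++ "'. Please refer to the textbook for more details."
  else
    "Based on the Physical AI & Humanoid Robotics textbook:\n\n" ++ synthesized_content ++ ".\n\nThis information addresses your question: '" ++ question ++ "'."

-- ===== PORT B =====
-- score(s) from Source B
def pvScore (qwords : List String) (s : String) : Int :=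
  let sl := PySem.Str.lower s
  ((qwords.map (fun w => if PySem.Str.isIn w sl then (1 : Int) else 0)).sum)

-- Source B's while-loop insertion: walk past kept pairs whose count is ≥ m, insert there
def pvInsertTop (x : String × Int) : List (String × Int) → List (String × Int)
  | [] => [x]
  | y :: ys => if x.2 ≤ y.2 then y :: pvInsertTop x ys else x :: y :: ys

def generate_basic_answer_alt (context : String) (question : String) : String :=
  let sentences := (PySem.Str.split? (PySem.Str.strip (PySem.Str.replace context "\n" " ")) ".").getD []
  let qwords := (PySem.Str.split₀ (PySem.Str.lower question)).filter (fun w => 3 < PySem.Str.len w)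
  let top := sentences.foldl (fun acc s =>
      let m := pvScore qwords s
      if 0 < m then (pvInsertTop (PySem.Str.strip s, m) acc).take 3 else acc) []
  let chosen := top.map (fun p => p.1)
  let chosen :=
    if chosen = [] then
      ((PySem.List.slice sentences none (some 3)).map PySem.Str.strip).filter (fun t => decide (¬ t = ""))
    else chosen
  let body := PySem.Str.strip (PySem.Str.join ". " chosen)
  if body = "" then
    "Based on the textbook content, I could not find specific information to answer: '" ++ question ++ "'. Please refer to the textbook for more details."
  else
    "Based on the Physical AI & Humanoid Robotics textbook:\n\n" ++ body ++ ".\n\nThis information addresses your question: '" ++ question ++ "'."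

-- ===== PRECONDITION & SPEC =====
def Spec_generate_basic_answer (context : String) (question : String) (out : String) : Prop := out = generate_basic_answer_alt context question
instance (context : String) (question : String) (out : String) : Decidable (Spec_generate_basic_answer context question out) := by unfold Spec_generate_basic_answer; infer_instance

-- ===== CLAIM (what is proved, stated in full; the proofs are below) =====
def Claim_equal_generate_basic_answer : Prop := ∀ (context : String) (question : String), Dom_generate_basic_answer context question → Spec_generate_basic_answer context question (generate_basic_answer context question)

-- ===== LEMMAS AND PROOFS =====

-- A's counting loop and B's 0/1-sum both count the matching words
theorem pvScore_eq (qwords : List String) (s : String) :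
    (qwords.foldl (fun n w => if PySem.Str.isIn w (PySem.Str.lower s) then n + 1 else n) (0 : Int))
      = pvScore qwords s := by
  rw [PySem.List.foldl_if_add_one]
  simp [pvScore, PySem.List.sum_map_ite_one_zero]

-- Source B's insertion is the stable descending insertion of the reverse sort
theorem pvInsertTop_eq (x : String × Int) (l : List (String × Int)) :
    pvInsertTop x l = PySem.List.insertBy (fun a b => decide (b.2 < a.2)) x l := by
  induction l with
  | nil => rfl
  | cons y ys ih =>
    simp only [pvInsertTop, PySem.List.insertBy]
    by_cases h : x.2 ≤ y.2
    · simp [h, ih, not_lt.mpr h]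
    · simp [h, lt_of_not_ge h]

-- inserting into the kept prefix and re-capping equals capping the full insertion
theorem take_insertBy (bef : (String × Int) → (String × Int) → Bool) (x : String × Int)
    (l : List (String × Int)) (n : Nat) :
    (PySem.List.insertBy bef x (l.take n)).take n = (PySem.List.insertBy bef x l).take n := by
  induction l generalizing n with
  | nil => simp
  | cons y ys ih =>
    cases n with
    | zero => simp
    | succ n =>
      simp only [List.take_succ_cons, PySem.List.insertBy]
      by_cases h : bef x y
      · cases n with
        | zero => simp [h]
        | succ m =>
          have hmin : min m (m + 1) = m := by omega
          simp [h, List.take_take]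
      · simp [h, ih]

-- the online capped fold computes the cap of the full stable fold
theorem foldl_capped (bef : (String × Int) → (String × Int) → Bool)
    (ps : List (String × Int)) (l : List (String × Int)) :
    ps.foldl (fun acc p => (PySem.List.insertBy bef p acc).take 3) (l.take 3)
      = (ps.foldl (fun acc p => PySem.List.insertBy bef p acc) l).take 3 := by
  induction ps generalizing l with
  | nil => rfl
  | cons p ps ih =>
    simp only [List.foldl_cons]
    rw [take_insertBy, ih]

-- map-then-filter = filter-then-map for the fallback sentences
theorem pvMapFilter (l : List String) :
    ((l.filter (fun s => decide (¬ PySem.Str.strip s = ""))).map PySem.Str.strip)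
      = (l.map PySem.Str.strip).filter (fun t => decide (¬ t = "")) := by
  induction l with
  | nil => rfl
  | cons s l ih =>
    simp only [List.map_cons, List.filter_cons, decide_not]
    by_cases h : PySem.Str.strip s = ""
    · simp only [h, decide_true, Bool.not_true]
      simpa [decide_not] using ih
    · simp only [h, decide_false, Bool.not_false, if_true, List.map_cons]
      simpa [decide_not] using ih

-- ===== VERDICT (by name: the statement is the Claim_ definition above) =====
theorem generate_basic_answer_spec : Claim_equal_generate_basic_answer := by
  intro context question _
  unfold Spec_generate_basic_answer generate_basic_answer generate_basic_answer_alt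
  simp only []
  set sentences := (PySem.Str.split? (PySem.Str.strip (PySem.Str.replace context "\n" " ")) ".").getD [] with hsent
  set qwords := (PySem.Str.split₀ (PySem.Str.lower question)).filter (fun w => 3 < PySem.Str.len w) with hqw
  -- identify the two fold conditions/payloads via pvScore_eq
  have hA : sentences.foldl (fun acc sentence =>
        let sentence_lower := PySem.Str.lower sentence
        let nmatches := qwords.foldl
          (fun n word => if PySem.Str.isIn word sentence_lower then n + 1 else n) (0 : Int)
        if 0 < nmatches then acc ++ [(PySem.Str.strip sentence, nmatches)] else acc) []
      = ((sentences.filter (fun s => decide (0 < pvScore qwords s))).map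
          (fun s => (PySem.Str.strip s, pvScore qwords s))) := by
    rw [show (fun (acc : List (String × Int)) (sentence : String) =>
          let sentence_lower := PySem.Str.lower sentence
          let nmatches := qwords.foldl
            (fun n word => if PySem.Str.isIn word sentence_lower then n + 1 else n) (0 : Int)
          if 0 < nmatches then acc ++ [(PySem.Str.strip sentence, nmatches)] else acc)
        = (fun acc s => if 0 < pvScore qwords s then
            acc ++ [(PySem.Str.strip s, pvScore qwords s)] else acc)
      from by funext acc s; simp only [pvScore_eq]]
    rw [PySem.List.foldl_append_ite]
    simp
  have hB : sentences.foldl (fun acc s =>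
        let m := pvScore qwords s
        if 0 < m then (pvInsertTop (PySem.Str.strip s, m) acc).take 3 else acc) []
      = (PySem.List.sorted
          ((sentences.filter (fun s => decide (0 < pvScore qwords s))).map
            (fun s => (PySem.Str.strip s, pvScore qwords s))) (fun p => p.2) true).take 3 := by
    rw [PySem.List.sorted_rev_eq_foldl_insertBy]
    rw [show (fun (acc : List (String × Int)) (s : String) =>
          let m := pvScore qwords s
          if 0 < m then (pvInsertTop (PySem.Str.strip s, m) acc).take 3 else acc)
        = (fun acc s => if 0 < pvScore qwords s then
            (PySem.List.insertBy (fun a b => decide (b.2 < a.2)) (PySem.Str.strip s, pvScore qwords s) acc).take 3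
          else acc) from by funext acc s; simp [pvInsertTop_eq]]
    rw [PySem.List.foldl_ite_eq_foldl_filter]
    rw [← List.foldl_map (f := fun s => (PySem.Str.strip s, pvScore qwords s))
        (g := fun acc p => (PySem.List.insertBy (fun a b => decide (b.2 < a.2)) p acc).take 3)]
    exact foldl_capped _ _ []
  rw [hA, hB]
  -- the top-3 lists coincide: slice _ none (some 3) is take 3
  have hsl : ∀ {α : Type} (xs : List α), PySem.List.slice xs none (some 3) = xs.take 3 := by
    intro α xs
    rw [PySem.List.slice_to xs (by norm_num : (0:Int) ≤ 3)]
    rfl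
  simp only [hsl, pvMapFilter]
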